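-- pv_equiv track=rewrite | github.com/PicciF/ParserSFS | script.py | formatting
-- ===== SOURCE A (Python) =====
-- def asteriskRemoval(lista):
--     idRead = ""
--     for read in lista:
--         if not read[0] == "*":
--             idRead = read[0]
--         else:
--             read[0] = idRead
--     return lista
--
-- def formatting(record):
--     support = []
--     result = []
--     for l in record:
--         support = l.split()
--         result.append(support)
--     result = asteriskRemoval(result)
--     return result
-- ===== SOURCE B (Python) =====
-- def formatting(record):
--     rows = [l.split() for l in record]
--     out = []
--     for i, r in enumerate(rows):
--         if r[0] != "*":
--             out.append(r)
--         else:
--             prev = ""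
--             for j in range(i - 1, -1, -1):
--                 if rows[j][0] != "*":
--                     prev = rows[j][0]
--                     break
--             out.append([prev] + r[1:])
--     return out
-- ===== Notes on version B (the rewrite author's own statement) =====
-- stated objective: alternative
-- what changed: Replaces A's stateful build-then-fix pass (carrying the last id through a mutating helper) with a stateless per-row backward search: each '*' row looks up the nearest previous row whose first token is not '*'.
import Mathlib
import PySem

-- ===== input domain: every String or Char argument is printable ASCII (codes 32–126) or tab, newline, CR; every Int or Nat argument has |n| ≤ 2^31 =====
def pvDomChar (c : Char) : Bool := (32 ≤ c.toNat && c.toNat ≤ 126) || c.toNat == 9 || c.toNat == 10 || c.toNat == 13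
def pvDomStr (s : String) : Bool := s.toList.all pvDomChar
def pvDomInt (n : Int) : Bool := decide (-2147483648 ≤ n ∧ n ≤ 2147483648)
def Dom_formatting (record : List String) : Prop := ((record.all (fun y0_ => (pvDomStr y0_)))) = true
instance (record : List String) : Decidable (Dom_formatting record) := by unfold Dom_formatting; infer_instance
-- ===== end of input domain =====

-- B replaces A's stateful build-then-fix pass with a stateless per-row backward search for the
-- nearest previous non-'*' leader; equivalence is about the return value (A mutates the rows it built, not its argument).
-- ===== PORT A =====
-- A's asteriskRemoval: a pass over the built list, carrying idRead, rewriting a leading "*"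
def asteriskRemoval (lista : List (List String)) : List (List String) :=
  (lista.foldl (fun (st : String × List (List String)) read =>
    match read with
    | [] => (st.1, st.2 ++ [read])  -- Python raises IndexError here; excluded by Pre_
    | t :: ts =>
      if ¬ (t == "*") then (t, st.2 ++ [t :: ts])
      else (st.1, st.2 ++ [st.1 :: ts])) ("", [])).2

def formatting (record : List String) : List (List String) :=
  asteriskRemoval (record.foldl (fun result l => result ++ [PySem.Str.split₀ l]) [])

-- ===== PORT B =====
-- Source B's inner loop `for j in range(i-1, -1, -1): if rows[j][0] != "*": prev = ...; break`,
-- searching downward from index i-1; default "".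
def prevId (rows : List (List String)) : Nat → String
  | 0 => ""
  | j+1 =>
    match rows.getD j [] with
    | [] => prevId rows j  -- unreachable in Python (it raises at the outer loop first); excluded by Pre_
    | t :: _ => if t == "*" then prevId rows j else t

def formatting_alt (record : List String) : List (List String) :=
  let rows := record.map PySem.Str.split₀
  rows.zipIdx.foldl (fun out (p : List String × Nat) =>
    match p.1 with
    | [] => out ++ [[]]  -- Python raises IndexError here; excluded by Pre_
    | t :: ts =>
      if t != "*" then out ++ [t :: ts]
      else out ++ [prevId rows p.2 :: ts]) []

-- ===== PRECONDITION & SPEC =====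
-- Pre_ excludes records containing a whitespace-only (token-less) line, on which both Pythons raise IndexError.
def Pre_formatting (record : List String) : Prop :=
  ∀ l ∈ record, PySem.Str.split₀ l ≠ []
instance (record : List String) : Decidable (Pre_formatting record) := by unfold Pre_formatting; infer_instance
def pvWitness_formatting : List String := ["a 1", "* 2", "b 3", "* 4"]
def Spec_formatting (record : List String) (out : List (List String)) : Prop := out = formatting_alt record
instance (record : List String) (out : List (List String)) : Decidable (Spec_formatting record out) := by unfold Spec_formatting; infer_instance

-- ===== CLAIM (what is proved, stated in full; the proofs are below) =====
def Claim_equal_formatting : Prop := ∀ (record : List String), Dom_formatting record → Pre_formatting record → Spec_formatting record (formatting record)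

-- ===== LEMMAS AND PROOFS =====
theorem getD_of_drop (rows : List (List String)) (k : Nat) (r : List String)
    (suf : List (List String)) (h : rows.drop k = r :: suf) : rows[k]? = some r := by
  have h1 := @List.getElem?_drop _ rows k 0
  rw [h] at h1
  simpa using h1.symm

-- A's carry-fold over a suffix of `rows`, started with carried id `prevId rows k`, produces
-- the same list as B's indexed fold over that suffix.
theorem key (suf : List (List String)) : ∀ (rows : List (List String)) (k : Nat)
    (acc : List (List String)), rows.drop k = suf → (∀ r ∈ suf, r ≠ []) →
    (suf.foldl (fun (st : String × List (List String)) read =>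
      match read with
      | [] => (st.1, st.2 ++ [read])
      | t :: ts =>
        if ¬ (t == "*") then (t, st.2 ++ [t :: ts])
        else (st.1, st.2 ++ [st.1 :: ts])) (prevId rows k, acc)).2
    = (suf.zipIdx k).foldl (fun out (p : List String × Nat) =>
        match p.1 with
        | [] => out ++ [[]]
        | t :: ts =>
          if t != "*" then out ++ [t :: ts]
          else out ++ [prevId rows p.2 :: ts]) acc := by
  induction suf with
  | nil => intro rows k acc _ _; simp
  | cons r suf ih =>
    intro rows k acc hdrop hne
    have hr : r ≠ [] := hne r (by simp)
    obtain ⟨t, ts, rfl⟩ : ∃ t ts, r = t :: ts := by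
      cases r with | nil => exact absurd rfl hr | cons t ts => exact ⟨t, ts, rfl⟩
    have hget : rows[k]? = some (t :: ts) := getD_of_drop rows k _ suf hdrop
    have hdrop' : rows.drop (k+1) = suf := by
      rw [← List.tail_drop, hdrop]; rfl
    have hne' : ∀ r ∈ suf, r ≠ [] := fun r hm => hne r (by simp [hm])
    by_cases ht : t = "*"
    · have hid : prevId rows (k+1) = prevId rows k := by
        simp [prevId, List.getD, hget, ht]
      have := ih rows (k+1) (acc ++ [prevId rows k :: ts]) hdrop' hne'
      simpa [List.zipIdx_cons, List.foldl_cons, ht, hid] using this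
    · have hid : prevId rows (k+1) = t := by
        simp [prevId, List.getD, hget, ht]
      have := ih rows (k+1) (acc ++ [t :: ts]) hdrop' hne'
      simp only [List.zipIdx_cons, List.foldl_cons]
      simpa [ht, hid] using this

theorem foldl_append_rows (ls : List String) (acc : List (List String)) :
    ls.foldl (fun result l => result ++ [PySem.Str.split₀ l]) acc
      = acc ++ ls.map PySem.Str.split₀ := by
  induction ls generalizing acc with
  | nil => simp
  | cons l ls ih => simp [List.foldl, ih]

-- ===== VERDICT (by name: the statement is the Claim_ definition above) =====
theorem formatting_spec : Claim_equal_formatting := by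
  intro record _ hpre
  unfold Spec_formatting formatting formatting_alt asteriskRemoval
  rw [foldl_append_rows]
  simp only [List.nil_append]
  have hne : ∀ r ∈ record.map PySem.Str.split₀, r ≠ [] := by
    intro r hm
    obtain ⟨l, hl, rfl⟩ := List.mem_map.mp hm
    exact hpre l hl
  have := key (record.map PySem.Str.split₀) (record.map PySem.Str.split₀) 0 [] (by simp) hne
  simpa [prevId] using this
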